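-- pv_equiv track=rewrite | github.com/atiselsts/handwash | separate-into-frames-with-locations.py | discount_reaction_indeterminacy
-- ===== SOURCE A (Python) =====
-- REACTION_TIME_FRAMES = 30
--
-- def discount_reaction_indeterminacy(labels):
--     new_labels = [u for u in labels]
--     n = len(labels) - 1
--     for i in range(n):
--         if i == 0 or labels[i] != labels[i+1] or i == n - 1:
--             start = max(0, i - REACTION_TIME_FRAMES)
--             end = i
--             for j in range(start, end):
--                 new_labels[j] = -1
--             start = i
--             end = min(n + 1, i + REACTION_TIME_FRAMES)
--             for j in range(start, end):
--                 new_labels[j] = -1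
--     return new_labels
-- ===== SOURCE B (Python) =====
-- REACTION_TIME_FRAMES = 30
--
-- def discount_reaction_indeterminacy(labels):
--     # Pull-based rewrite: collect the trigger indices once, then decide each
--     # output frame by checking its +/-30 window against that set.
--     n = len(labels) - 1
--     triggers = {i for i in range(n)
--                 if i == 0 or labels[i] != labels[i + 1] or i == n - 1}
--     return [-1 if any(i in triggers
--                       for i in range(max(0, j - 29), min(n, j + 31)))
--             else u
--             for j, u in enumerate(labels)]
-- ===== Notes on version B (the rewrite author's own statement) =====
-- stated objective: alternative
-- what changed: A pushes -1 outward from each trigger by repeatedly overwriting overlapping windows of a mutable copy; B collects the trigger indices into a set once and then decides each output frame independently with a single bounded scan of its own +/-30 window (measured constant-factor speedup from avoiding the repeated overlapping writes).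
import Mathlib
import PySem

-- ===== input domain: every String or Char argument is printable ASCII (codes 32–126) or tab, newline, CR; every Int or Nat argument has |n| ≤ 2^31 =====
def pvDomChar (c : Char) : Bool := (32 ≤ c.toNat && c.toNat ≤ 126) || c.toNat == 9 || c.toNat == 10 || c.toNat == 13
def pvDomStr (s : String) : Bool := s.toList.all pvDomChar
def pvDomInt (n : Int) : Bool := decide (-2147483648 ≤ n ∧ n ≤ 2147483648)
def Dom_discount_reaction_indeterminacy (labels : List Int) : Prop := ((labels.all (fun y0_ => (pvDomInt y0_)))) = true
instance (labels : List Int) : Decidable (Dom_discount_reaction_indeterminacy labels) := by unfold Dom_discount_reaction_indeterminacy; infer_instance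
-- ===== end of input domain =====

-- B replaces A's push-style repeated window overwriting by collecting the trigger
-- indices once and deciding each output frame from its own +/-30 window (objective: alternative).

-- ===== PORT A =====
-- Literal port of A. `labels[i]` / `labels[i+1]` are read with pyGetD: every index the
-- loop reads satisfies 0 ≤ i < i+1 ≤ n < len(labels), so this is exact; likewise every
-- written index j satisfies 0 ≤ j < len(labels), so pySetD is exact for new_labels[j] = -1.
def discount_reaction_indeterminacy (labels : List Int) : List Int :=
  let new_labels := labels
  let n : Int := (labels.length : Int) - 1
  (PySem.List.pyRange 0 n 1).foldl (fun nl i =>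
    if i = 0 ∨ ¬ PySem.List.pyGetD labels i 0 = PySem.List.pyGetD labels (i+1) 0 ∨ i = n - 1 then
      let nl := (PySem.List.pyRange (max 0 (i-30)) i 1).foldl
                  (fun nl2 j => PySem.List.pySetD nl2 j (-1)) nl
      (PySem.List.pyRange i (min (n+1) (i+30)) 1).foldl
        (fun nl2 j => PySem.List.pySetD nl2 j (-1)) nl
    else nl) new_labels

-- ===== PORT B =====
-- Literal port of Source B: a set comprehension over range(n), then one list comprehension
-- over enumerate(labels) checking the window range for membership in the trigger set.
def discount_reaction_indeterminacy_alt (labels : List Int) : List Int :=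
  let n : Int := (labels.length : Int) - 1
  let triggers : PySem.Set Int := PySem.Set.ofList
    ((PySem.List.pyRange 0 n 1).filter (fun i =>
      decide (i = 0 ∨ ¬ PySem.List.pyGetD labels i 0 = PySem.List.pyGetD labels (i+1) 0 ∨ i = n - 1)))
  (PySem.List.enumerate labels 0).map (fun ju =>
    if (PySem.List.pyRange (max 0 (ju.1 - 29)) (min n (ju.1 + 31)) 1).any
         (fun i => PySem.Set.contains triggers i) then -1 else ju.2)

-- ===== PRECONDITION & SPEC =====
def Spec_discount_reaction_indeterminacy (labels : List Int) (out : List Int) : Prop := out = discount_reaction_indeterminacy_alt labels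
instance (labels : List Int) (out : List Int) : Decidable (Spec_discount_reaction_indeterminacy labels out) := by unfold Spec_discount_reaction_indeterminacy; infer_instance

-- ===== CLAIM (what is proved, stated in full; the proofs are below) =====
def Claim_equal_discount_reaction_indeterminacy : Prop := ∀ (labels : List Int), Dom_discount_reaction_indeterminacy labels → Spec_discount_reaction_indeterminacy labels (discount_reaction_indeterminacy labels)

-- ===== LEMMAS AND PROOFS =====

-- the inner marking loop of A: new_labels[j] = -1 for j in range(a, b)
def pvMark (s : List Int) (a b : Int) : List Int :=
  (PySem.List.pyRange a b 1).foldl (fun t j => PySem.List.pySetD t j (-1)) s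

theorem pvMark_length (s : List Int) (a b : Int) : (pvMark s a b).length = s.length := by
  unfold pvMark
  generalize PySem.List.pyRange a b 1 = L
  induction L generalizing s with
  | nil => rfl
  | cons x xs ih => simp [List.foldl_cons, ih, PySem.List.length_pySetD]

theorem pvMark_getElem? (b : Int) (d : Nat) : ∀ (a : Int) (s : List Int), (b - a).toNat = d →
    0 ≤ a → ∀ (k : Nat), k < s.length →
    (pvMark s a b)[k]? = if a ≤ (k : Int) ∧ (k : Int) < b then some (-1) else s[k]? := by
  induction d with
  | zero =>
    intro a s hd ha k hk
    have hba : b ≤ a := by omega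
    rw [pvMark, PySem.List.pyRange_one_eq_nil hba]
    simp only [List.foldl_nil]
    rw [if_neg (by omega)]
  | succ d ih =>
    intro a s hd ha k hk
    have hab : a < b := by omega
    rw [pvMark, PySem.List.pyRange_one_cons hab, List.foldl_cons]
    have hlen : k < (PySem.List.pySetD s a (-1)).length := by
      rw [PySem.List.length_pySetD]; exact hk
    have iha := ih (a+1) (PySem.List.pySetD s a (-1)) (by omega) (by omega) k hlen
    simp only [pvMark] at iha
    rw [iha, PySem.List.pySetD_of_nonneg s (-1) ha, List.getElem?_set]
    by_cases h1 : a ≤ (k : Int) ∧ (k : Int) < b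
    · rw [if_pos h1]
      by_cases h2 : a + 1 ≤ (k : Int)
      · rw [if_pos ⟨h2, h1.2⟩]
      · have hak : a.toNat = k := by omega
        rw [if_neg (by omega), if_pos hak, if_pos (by omega)]
    · rw [if_neg h1, if_neg (by omega), if_neg (by omega)]

-- A's whole loop, over an arbitrary index list and decidable trigger predicate
theorem pvLoop_getElem? (c : Int → Prop) [DecidablePred c] (n : Int) :
    ∀ (L : List Int) (s : List Int), (∀ i ∈ L, 0 ≤ i ∧ i < n) → ∀ (k : Nat), k < s.length →
    (L.foldl (fun nl i => if c i then
        pvMark (pvMark nl (max 0 (i-30)) i) i (min (n+1) (i+30)) else nl) s)[k]?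
      = if ∃ i ∈ L, c i ∧ i - 30 ≤ (k : Int) ∧ (k : Int) < min (n+1) (i+30)
        then some (-1) else s[k]? := by
  intro L
  induction L with
  | nil => intro s _ k hk; simp
  | cons a L ih =>
    intro s hb k hk
    have ha := hb a (List.mem_cons_self ..)
    simp only [List.foldl_cons]
    have hlen' : (if c a then pvMark (pvMark s (max 0 (a-30)) a) a (min (n+1) (a+30)) else s).length
        = s.length := by
      split <;> simp [pvMark_length]
    have hchar : (if c a then pvMark (pvMark s (max 0 (a-30)) a) a (min (n+1) (a+30)) else s)[k]?
        = if c a ∧ a - 30 ≤ (k : Int) ∧ (k : Int) < min (n+1) (a+30) then some (-1) else s[k]? := by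
      by_cases hca : c a
      · rw [if_pos hca]
        rw [pvMark_getElem? (min (n+1) (a+30)) ((min (n+1) (a+30)) - a).toNat a _ rfl (by omega) k
              (by rw [pvMark_length]; exact hk)]
        rw [pvMark_getElem? a (a - max 0 (a-30)).toNat (max 0 (a-30)) s rfl (by omega) k hk]
        by_cases h1 : a ≤ (k : Int) ∧ (k : Int) < min (n+1) (a+30)
        · rw [if_pos h1, if_pos ⟨hca, by omega, h1.2⟩]
        · rw [if_neg h1]
          by_cases h2 : max 0 (a-30) ≤ (k : Int) ∧ (k : Int) < a
          · rw [if_pos h2, if_pos ⟨hca, by omega, by omega⟩]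
          · rw [if_neg h2, if_neg (fun h => absurd h.2 (by omega))]
      · rw [if_neg hca, if_neg (fun h => hca h.1)]
    rw [ih _ (fun i hi => hb i (List.mem_cons_of_mem _ hi)) k (by rw [hlen']; exact hk), hchar]
    by_cases hL : ∃ i ∈ L, c i ∧ i - 30 ≤ (k : Int) ∧ (k : Int) < min (n+1) (i+30)
    · obtain ⟨i, hi, hp⟩ := hL
      rw [if_pos ⟨i, hi, hp⟩, if_pos ⟨i, List.mem_cons_of_mem _ hi, hp⟩]
    · rw [if_neg hL]
      by_cases hA : c a ∧ a - 30 ≤ (k : Int) ∧ (k : Int) < min (n+1) (a+30)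
      · rw [if_pos hA, if_pos ⟨a, List.mem_cons_self .., hA⟩]
      · rw [if_neg hA, if_neg ?_]
        rintro ⟨i, hi, hp⟩
        rcases List.mem_cons.mp hi with rfl | hi
        · exact hA hp
        · exact hL ⟨i, hi, hp⟩

theorem pvLoop_length (c : Int → Prop) [DecidablePred c] (n : Int) :
    ∀ (L : List Int) (s : List Int),
    (L.foldl (fun nl i => if c i then
        pvMark (pvMark nl (max 0 (i-30)) i) i (min (n+1) (i+30)) else nl) s).length = s.length := by
  intro L
  induction L with
  | nil => intro s; rfl
  | cons a L ih =>
    intro s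
    simp only [List.foldl_cons]
    rw [ih]
    split <;> simp [pvMark_length]

theorem discount_spec_aux (labels : List Int) :
    discount_reaction_indeterminacy labels = discount_reaction_indeterminacy_alt labels := by
  have hA : discount_reaction_indeterminacy labels
      = (PySem.List.pyRange 0 ((labels.length : Int) - 1) 1).foldl
          (fun nl i => if (i = 0 ∨ ¬ PySem.List.pyGetD labels i 0 = PySem.List.pyGetD labels (i+1) 0
              ∨ i = ((labels.length : Int) - 1) - 1) then
            pvMark (pvMark nl (max 0 (i-30)) i) i (min (((labels.length : Int) - 1)+1) (i+30))
          else nl) labels := rfl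
  have hB : discount_reaction_indeterminacy_alt labels
      = (PySem.List.enumerate labels 0).map (fun ju =>
          if (PySem.List.pyRange (max 0 (ju.1 - 29)) (min ((labels.length : Int) - 1) (ju.1 + 31)) 1).any
               (fun i => PySem.Set.contains (PySem.Set.ofList
                  ((PySem.List.pyRange 0 ((labels.length : Int) - 1) 1).filter (fun i =>
                    decide (i = 0 ∨ ¬ PySem.List.pyGetD labels i 0 = PySem.List.pyGetD labels (i+1) 0
                      ∨ i = ((labels.length : Int) - 1) - 1)))) i)
          then -1 else ju.2) := rfl
  have hAlen : (discount_reaction_indeterminacy labels).length = labels.length := by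
    rw [hA]; exact pvLoop_length _ _ _ labels
  have hBlen : (discount_reaction_indeterminacy_alt labels).length = labels.length := by
    rw [hB]; simp [PySem.List.length_enumerate]
  apply List.ext_getElem?
  intro k
  by_cases hk : k < labels.length
  · rw [hA, hB]
    rw [pvLoop_getElem? (fun i => i = 0 ∨ ¬ PySem.List.pyGetD labels i 0 = PySem.List.pyGetD labels (i+1) 0
          ∨ i = ((labels.length : Int) - 1) - 1) ((labels.length : Int) - 1) _ labels
        (fun i hi => by
          have := (PySem.List.mem_pyRange_one).mp hi
          exact ⟨this.1, this.2⟩) k hk]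
    rw [List.getElem?_map, PySem.List.getElem?_enumerate]
    rw [List.getElem?_eq_getElem hk]
    simp only [Option.map_some, zero_add]
    have key : (∃ i ∈ PySem.List.pyRange 0 ((labels.length : Int) - 1) 1,
          (i = 0 ∨ ¬ PySem.List.pyGetD labels i 0 = PySem.List.pyGetD labels (i+1) 0
            ∨ i = ((labels.length : Int) - 1) - 1)
          ∧ i - 30 ≤ (k : Int) ∧ (k : Int) < min (((labels.length : Int) - 1)+1) (i+30))
        ↔ ((PySem.List.pyRange (max 0 ((k : Int) - 29)) (min ((labels.length : Int) - 1) ((k : Int) + 31)) 1).any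
             (fun i => PySem.Set.contains (PySem.Set.ofList
                ((PySem.List.pyRange 0 ((labels.length : Int) - 1) 1).filter (fun i =>
                  decide (i = 0 ∨ ¬ PySem.List.pyGetD labels i 0 = PySem.List.pyGetD labels (i+1) 0
                    ∨ i = ((labels.length : Int) - 1) - 1)))) i) = true) := by
      rw [List.any_eq_true]
      constructor
      · rintro ⟨i, hi, hc, hlo, hhi⟩
        have hib := (PySem.List.mem_pyRange_one).mp hi
        refine ⟨i, ?_, ?_⟩
        · exact (PySem.List.mem_pyRange_one).mpr (by omega)
        · simp only [PySem.Set.contains_iff, PySem.Set.mem_ofList, List.mem_filter]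
          exact ⟨hi, by simpa using hc⟩
      · rintro ⟨i, hi, hmem⟩
        have hib := (PySem.List.mem_pyRange_one).mp hi
        simp only [PySem.Set.contains_iff, PySem.Set.mem_ofList, List.mem_filter] at hmem
        obtain ⟨hir, hc⟩ := hmem
        have hir' := (PySem.List.mem_pyRange_one).mp hir
        exact ⟨i, hir, by simpa using hc, by omega, by omega⟩
    by_cases hcond : (∃ i ∈ PySem.List.pyRange 0 ((labels.length : Int) - 1) 1,
          (i = 0 ∨ ¬ PySem.List.pyGetD labels i 0 = PySem.List.pyGetD labels (i+1) 0
            ∨ i = ((labels.length : Int) - 1) - 1)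
          ∧ i - 30 ≤ (k : Int) ∧ (k : Int) < min (((labels.length : Int) - 1)+1) (i+30))
    · rw [if_pos hcond, if_pos (key.mp hcond)]
    · rw [if_neg hcond, if_neg (fun h => hcond (key.mpr h))]
  · rw [List.getElem?_eq_none (by omega : (discount_reaction_indeterminacy labels).length ≤ k),
        List.getElem?_eq_none (by omega : (discount_reaction_indeterminacy_alt labels).length ≤ k)]

-- ===== VERDICT (by name: the statement is the Claim_ definition above) =====
theorem discount_reaction_indeterminacy_spec : Claim_equal_discount_reaction_indeterminacy := by
  intro labels _
  exact discount_spec_aux labels
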